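-- pv_equiv track=rewrite | github.com/Kevin-kkkki/AQMTL-RS | tools/test_quant.py | get_task_metrics
-- ===== SOURCE A (Python) =====
-- from typing import List
--
-- def get_task_metrics(task_type: str, eval_args: List[str]):
--     """根据任务类型，从 eval_args 中筛选出正确的指标。"""
--     lower_args = [m.lower() for m in eval_args]
--     if task_type == 'cls':
--         metrics = [m for m in lower_args if 'accuracy' in m or 'top' in m]
--         return metrics if metrics else ['accuracy']
--     elif task_type == 'det':
--         metrics = [m for m in lower_args if 'bbox' in m]
--         return metrics if metrics else ['bbox']
--     elif task_type == 'seg':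
--         metrics = [m for m in lower_args if 'miou' in m or 'fscore' in m]
--         return metrics if metrics else ['mIoU']
--     return args.eval
-- ===== SOURCE B (Python) =====
-- from typing import List
--
-- def get_task_metrics(task_type: str, eval_args: List[str]):
--     """Classify every metric into per-task buckets in one task-agnostic pass,
--     then select the requested bucket (or its default)."""
--     buckets = {'cls': [], 'det': [], 'seg': []}
--     for m in eval_args:
--         lm = m.lower()
--         if 'accuracy' in lm or 'top' in lm:
--             buckets['cls'].append(lm)
--         if 'bbox' in lm:
--             buckets['det'].append(lm)
--         if 'miou' in lm or 'fscore' in lm: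
--             buckets['seg'].append(lm)
--     defaults = {'cls': ['accuracy'], 'det': ['bbox'], 'seg': ['mIoU']}
--     return buckets[task_type] or defaults[task_type]
-- ===== Notes on version B (the rewrite author's own statement) =====
-- stated objective: alternative
-- what changed: Instead of branching on task_type and then filtering with that branch's keywords, B makes one task-agnostic pass that classifies every metric into all three per-task buckets simultaneously, then merely selects the requested bucket (or its default); unknown task types raise KeyError in B where A raises NameError (excluded by Pre_).
import Mathlib
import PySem

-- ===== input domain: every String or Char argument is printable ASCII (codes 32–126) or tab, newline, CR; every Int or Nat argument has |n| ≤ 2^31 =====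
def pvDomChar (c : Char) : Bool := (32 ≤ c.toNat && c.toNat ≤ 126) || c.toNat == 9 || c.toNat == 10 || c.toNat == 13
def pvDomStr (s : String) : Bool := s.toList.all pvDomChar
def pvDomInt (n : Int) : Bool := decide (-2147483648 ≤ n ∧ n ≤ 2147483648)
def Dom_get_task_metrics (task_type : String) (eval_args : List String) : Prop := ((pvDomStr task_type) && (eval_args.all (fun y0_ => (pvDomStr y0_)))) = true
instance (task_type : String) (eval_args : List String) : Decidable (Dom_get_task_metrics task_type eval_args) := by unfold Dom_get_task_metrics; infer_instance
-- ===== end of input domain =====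

-- B replaces A's branch-then-filter with one task-agnostic classification pass into three buckets, then selection (objective: alternative; return-value equivalence on known task types).


-- ===== PORT A =====
def get_task_metrics (task_type : String) (eval_args : List String) : List String :=
  let lower_args := eval_args.map PySem.Str.lower
  if task_type == "cls" then
    let metrics := lower_args.filter (fun m => PySem.Str.isIn "accuracy" m || PySem.Str.isIn "top" m)
    if metrics.isEmpty then ["accuracy"] else metrics
  else if task_type == "det" then
    let metrics := lower_args.filter (fun m => PySem.Str.isIn "bbox" m)
    if metrics.isEmpty then ["bbox"] else metrics
  else if task_type == "seg" then
    let metrics := lower_args.filter (fun m => PySem.Str.isIn "miou" m || PySem.Str.isIn "fscore" m)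
    if metrics.isEmpty then ["mIoU"] else metrics
  else
    []  -- Python raises NameError here ('args' is undefined); excluded by Pre_

-- ===== PORT B =====
-- one loop iteration of Source B: classify the lowered metric into every bucket it belongs to
def pvStep (b : List String × List String × List String) (m : String) :
    List String × List String × List String :=
  let lm := PySem.Str.lower m
  let b := if PySem.Str.isIn "accuracy" lm || PySem.Str.isIn "top" lm then (b.1 ++ [lm], b.2.1, b.2.2) else b
  let b := if PySem.Str.isIn "bbox" lm then (b.1, b.2.1 ++ [lm], b.2.2) else b
  let b := if PySem.Str.isIn "miou" lm || PySem.Str.isIn "fscore" lm then (b.1, b.2.1, b.2.2 ++ [lm]) else b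
  b

def get_task_metrics_alt (task_type : String) (eval_args : List String) : List String :=
  let buckets := eval_args.foldl pvStep ([], [], [])
  -- buckets[task_type] or defaults[task_type]  (unknown task_type raises KeyError in Python; excluded by Pre_)
  if task_type == "cls" then (if buckets.1.isEmpty then ["accuracy"] else buckets.1)
  else if task_type == "det" then (if buckets.2.1.isEmpty then ["bbox"] else buckets.2.1)
  else if task_type == "seg" then (if buckets.2.2.isEmpty then ["mIoU"] else buckets.2.2)
  else []

-- ===== PRECONDITION & SPEC =====
-- Pre_ excludes unknown task types, on which A raises NameError ('args' is undefined) and B raises KeyError.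
def Pre_get_task_metrics (task_type : String) (eval_args : List String) : Prop :=
  task_type = "cls" ∨ task_type = "det" ∨ task_type = "seg"
instance (task_type : String) (eval_args : List String) : Decidable (Pre_get_task_metrics task_type eval_args) := by unfold Pre_get_task_metrics; infer_instance
def pvWitness_get_task_metrics : String × List String := ("cls", ["Accuracy", "Top-1", "bbox"])

def Spec_get_task_metrics (task_type : String) (eval_args : List String) (out : List String) : Prop := out = get_task_metrics_alt task_type eval_args
instance (task_type : String) (eval_args : List String) (out : List String) : Decidable (Spec_get_task_metrics task_type eval_args out) := by unfold Spec_get_task_metrics; infer_instance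

-- ===== CLAIM (what is proved, stated in full; the proofs are below) =====
def Claim_equal_get_task_metrics : Prop := ∀ (task_type : String) (eval_args : List String), Dom_get_task_metrics task_type eval_args → Pre_get_task_metrics task_type eval_args → Spec_get_task_metrics task_type eval_args (get_task_metrics task_type eval_args)

-- ===== LEMMAS AND PROOFS =====
-- Invariant of B's bucket fold: each component accumulates exactly A's corresponding filter.
theorem pv_fold_buckets (l : List String) (a b c : List String) :
    l.foldl pvStep (a, b, c)
    = (a ++ (l.map PySem.Str.lower).filter (fun m => PySem.Str.isIn "accuracy" m || PySem.Str.isIn "top" m),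
       b ++ (l.map PySem.Str.lower).filter (fun m => PySem.Str.isIn "bbox" m),
       c ++ (l.map PySem.Str.lower).filter (fun m => PySem.Str.isIn "miou" m || PySem.Str.isIn "fscore" m)) := by
  induction l generalizing a b c with
  | nil => simp
  | cons x t ih =>
    simp only [List.foldl_cons, List.map_cons, List.filter_cons]
    rw [pvStep]
    by_cases h1 : (PySem.Str.isIn "accuracy" (PySem.Str.lower x) || PySem.Str.isIn "top" (PySem.Str.lower x)) = true <;>
    by_cases h2 : PySem.Str.isIn "bbox" (PySem.Str.lower x) = true <;>
    by_cases h3 : (PySem.Str.isIn "miou" (PySem.Str.lower x) || PySem.Str.isIn "fscore" (PySem.Str.lower x)) = true <;>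
    simp only [h1, h2, h3, if_true, if_false, Bool.false_eq_true, ite_true, ite_false] <;>
    rw [ih] <;> simp

-- ===== VERDICT (by name: the statement is the Claim_ definition above) =====
theorem get_task_metrics_spec : Claim_equal_get_task_metrics := by
  intro task_type eval_args _ hpre
  unfold Spec_get_task_metrics get_task_metrics get_task_metrics_alt
  rcases hpre with h | h | h <;> subst h <;>
    simp only [pv_fold_buckets, List.nil_append] <;> rfl
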